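-- pv_equiv track=rewrite | github.com/jvcmtr/velocidade_qualidade_tp2 | questao1.py | encontra_maior_hash_count
-- ===== SOURCE A (Python) =====
-- def encontra_maior_hash_count(arr):
--     if not arr or len(arr) < 1:
--         return None, 0
--
--     max = None
--     count = 0
--     seen = {}
--
--     for i in arr:
--         if not seen.get(i):
--             seen[i] = 0
--
--         seen[i] += 1
--         if seen[i] <=1 :
--             continue
--
--     for i in arr:
--         count += 1
--         if seen[i] > 1:
--             continue
--         if max==None or i > max:
--             max = i
--
--     return max, count
-- ===== SOURCE B (Python) =====
-- def encontra_maior_hash_count(arr):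
--     if not arr:
--         return None, 0
--     s = sorted(arr)
--     best = None
--     run = 1
--     for prev, cur in zip(s, s[1:]):
--         if cur == prev:
--             run += 1
--         else:
--             if run == 1 and (best is None or prev > best):
--                 best = prev
--             run = 1
--     if run == 1 and (best is None or s[-1] > best):
--         best = s[-1]
--     return best, len(s)
-- ===== Notes on version B (the rewrite author's own statement) =====
-- stated objective: alternative
-- what changed: B sorts the array and finds the maximum non-duplicated element by a single adjacent-equality run-length scan over the sorted list (a singleton run is a unique element, and equal elements are adjacent once sorted), replacing A's hash-map counting pass plus second full re-scan of the array; the length is len(s).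
import Mathlib
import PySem

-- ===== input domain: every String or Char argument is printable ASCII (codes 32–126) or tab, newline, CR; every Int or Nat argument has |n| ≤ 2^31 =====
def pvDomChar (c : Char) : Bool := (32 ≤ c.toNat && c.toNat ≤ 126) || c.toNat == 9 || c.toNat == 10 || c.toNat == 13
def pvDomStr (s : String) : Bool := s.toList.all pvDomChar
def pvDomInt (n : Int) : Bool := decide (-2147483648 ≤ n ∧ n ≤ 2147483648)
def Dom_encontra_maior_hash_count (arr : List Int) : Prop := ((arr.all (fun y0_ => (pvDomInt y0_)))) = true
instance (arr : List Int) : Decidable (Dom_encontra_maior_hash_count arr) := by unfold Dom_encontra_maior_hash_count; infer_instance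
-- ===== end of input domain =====

-- B sorts the array and finds the max non-duplicated element by a single adjacent-equality
-- run-length scan over the sorted list (equal elements are adjacent once sorted), instead of
-- A's hash-count pass plus a second full re-scan of the array (objective: alternative).


-- ===== PORT A =====
-- Python falsiness of `seen.get(i)` (None or 0 is falsy; values here are ints)
def pvFalsyOptInt (o : Option Int) : Bool :=
  match o with
  | none => true
  | some v => v == 0

def encontra_maior_hash_count (arr : List Int) : Option Int × Int :=
  if arr.isEmpty || arr.length < 1 then (none, 0)
  else
    -- first loop: build `seen` (the `if seen[i] <= 1: continue` is a trailing no-op and emitted nothing)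
    let seen : PySem.Dict Int Int := arr.foldl (fun d i =>
      let d := if pvFalsyOptInt (d.get? i) then d.insert i 0 else d
      d.modify i 0 (· + 1)) PySem.Dict.empty
    -- second loop over arr; `seen[i]` is exact as getD since every i ∈ arr is a key of seen
    let st := arr.foldl (fun (st : Option Int × Int) i =>
      let count := st.2 + 1
      if 1 < seen.getD i 0 then (st.1, count)
      else
        match st.1 with
        | none => (some i, count)
        | some m => if i > m then (some i, count) else (st.1, count)) (none, 0)
    st

-- ===== PORT B =====
-- `best = prev if best is None or prev > best else best`
def mstep (best : Option Int) (i : Int) : Option Int :=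
  match best with
  | none => some i
  | some m => if i > m then some i else best

-- the loop body over (prev, cur) pairs; state = (best, run)
def bstep (st : Option Int × Int) (pc : Int × Int) : Option Int × Int :=
  if pc.2 == pc.1 then (st.1, st.2 + 1)
  else (if st.2 == 1 then mstep st.1 pc.1 else st.1, 1)

def encontra_maior_hash_count_alt (arr : List Int) : Option Int × Int :=
  if arr.isEmpty then (none, 0)
  else
    let s := PySem.List.sorted arr (fun x => x) false
    let st := (s.zip (PySem.List.slice s (some 1) none)).foldl bstep (none, 1)
    let best :=
      if st.2 == 1 then
        match PySem.List.pyGet? s (-1) with   -- s[-1]; s ≠ [] here so this is never none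
        | some l => mstep st.1 l
        | none => st.1
      else st.1
    (best, (s.length : Int))

-- ===== PRECONDITION & SPEC =====
def Spec_encontra_maior_hash_count (arr : List Int) (out : Option Int × Int) : Prop := out = encontra_maior_hash_count_alt arr
instance (arr : List Int) (out : Option Int × Int) : Decidable (Spec_encontra_maior_hash_count arr out) := by unfold Spec_encontra_maior_hash_count; infer_instance

-- ===== CLAIM (what is proved, stated in full; the proofs are below) =====
def Claim_equal_encontra_maior_hash_count : Prop := ∀ (arr : List Int), Dom_encontra_maior_hash_count arr → Spec_encontra_maior_hash_count arr (encontra_maior_hash_count arr)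

-- ===== LEMMAS AND PROOFS =====

-- A's dict-building step is exactly Counter's step.
theorem astep_eq_modify (d : PySem.Dict Int Int) (i : Int) :
    (let d' := if pvFalsyOptInt (d.get? i) then d.insert i 0 else d
     d'.modify i 0 (· + 1)) = d.modify i 0 (· + 1) := by
  cases h : d.get? i with
  | none =>
    rw [if_pos (by simp [pvFalsyOptInt])]
    simp only [PySem.Dict.modify]
    rw [PySem.Dict.getD_insert_self, PySem.Dict.insert_insert_self,
      PySem.Dict.getD_of_get?_eq_none d 0 h]
  | some v =>
    by_cases hv : v = 0
    · subst hv
      rw [if_pos (by simp [pvFalsyOptInt])]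
      simp only [PySem.Dict.modify]
      rw [PySem.Dict.getD_insert_self, PySem.Dict.insert_insert_self,
        PySem.Dict.getD_of_get?_eq_some d 0 h]
    · rw [if_neg (by simp [pvFalsyOptInt, hv])]

theorem seen_eq_counter (arr : List Int) :
    arr.foldl (fun d i =>
      let d := if pvFalsyOptInt (d.get? i) then d.insert i 0 else d
      d.modify i 0 (· + 1)) PySem.Dict.empty = PySem.Dict.counter arr := by
  rw [PySem.Dict.counter_eq_foldl]
  congr 1
  funext d i
  exact astep_eq_modify d i

theorem mstep_some (xs : List Int) : ∀ a : Int, xs.foldl mstep (some a) = some (xs.foldl max a) := by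
  induction xs with
  | nil => intro a; rfl
  | cons x xs ih =>
    intro a
    have h : mstep (some a) x = some (max a x) := by
      simp only [mstep]
      rcases lt_or_ge a x with h | h
      · rw [if_pos h, max_eq_right h.le]
      · rw [if_neg (not_lt.mpr h), max_eq_left h]
    simp only [List.foldl_cons, h, ih]

theorem foldl_mstep_eq_of_same_mem (l1 l2 : List Int) (h : ∀ x, x ∈ l1 ↔ x ∈ l2) :
    l1.foldl mstep none = l2.foldl mstep none := by
  cases l1 with
  | nil =>
    cases l2 with
    | nil => rfl
    | cons y ys => exact absurd ((h y).mpr List.mem_cons_self) (List.not_mem_nil)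
  | cons x xs =>
    cases l2 with
    | nil => exact absurd ((h x).mp List.mem_cons_self) (List.not_mem_nil)
    | cons y ys =>
      simp only [List.foldl_cons]
      show (xs.foldl mstep (mstep none x)) = (ys.foldl mstep (mstep none y))
      simp only [mstep, mstep_some]
      congr 1
      obtain ⟨hax, hle1⟩ := PySem.List.le_foldl_max xs x
      obtain ⟨hay, hle2⟩ := PySem.List.le_foldl_max ys y
      have hm1 : xs.foldl max x ∈ x :: xs := by
        rcases PySem.List.foldl_max_mem xs x with hc | hc
        · rw [hc]; exact List.mem_cons_self
        · exact List.mem_cons_of_mem _ hc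
      have hm2 : ys.foldl max y ∈ y :: ys := by
        rcases PySem.List.foldl_max_mem ys y with hc | hc
        · rw [hc]; exact List.mem_cons_self
        · exact List.mem_cons_of_mem _ hc
      have hub1 : ∀ z ∈ x :: xs, z ≤ xs.foldl max x := by
        intro z hz
        rcases List.mem_cons.mp hz with hz | hz
        · rw [hz]; exact hax
        · exact hle1 _ hz
      have hub2 : ∀ z ∈ y :: ys, z ≤ ys.foldl max y := by
        intro z hz
        rcases List.mem_cons.mp hz with hz | hz
        · rw [hz]; exact hay
        · exact hle2 _ hz
      exact le_antisymm (hub2 _ ((h _).mp hm1)) (hub1 _ ((h _).mpr hm2))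

-- A's second loop splits into (max-fold over skipped arr, length).
theorem pair_fold_split (cnt : Int → Int) (arr : List Int) : ∀ (m0 : Option Int) (c0 : Int),
    arr.foldl (fun (st : Option Int × Int) i =>
      let count := st.2 + 1
      if 1 < cnt i then (st.1, count)
      else
        match st.1 with
        | none => (some i, count)
        | some m => if i > m then (some i, count) else (st.1, count)) (m0, c0)
    = (arr.foldl (fun acc i => if 1 < cnt i then acc else mstep acc i) m0, c0 + (arr.length : Int)) := by
  induction arr with
  | nil => intro m0 c0; simp
  | cons x xs ih =>
    intro m0 c0
    simp only [List.foldl_cons, List.length_cons]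
    by_cases hx : 1 < cnt x
    · rw [if_pos hx]
      rw [ih]
      simp only [if_pos hx]
      rw [Prod.mk.injEq]
      exact ⟨rfl, by push_cast; ring⟩
    · rw [if_neg hx]
      cases m0 with
      | none =>
        rw [ih]
        simp only [if_neg hx, mstep]
        rw [Prod.mk.injEq]
        exact ⟨rfl, by push_cast; ring⟩
      | some m =>
        rw [show (match (some m : Option Int) with
              | none => ((some x : Option Int), c0 + 1)
              | some m_1 => if x > m_1 then (some x, c0 + 1) else (some m, c0 + 1))
            = if x > m then (some x, c0 + 1) else (some m, c0 + 1) from rfl]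
        by_cases hm : x > m
        · rw [if_pos hm, ih]
          simp only [if_neg hx, mstep, if_pos hm]
          rw [Prod.mk.injEq]
          exact ⟨rfl, by push_cast; ring⟩
        · rw [if_neg hm, ih]
          simp only [if_neg hx, mstep, if_neg hm]
          rw [Prod.mk.injEq]
          exact ⟨rfl, by push_cast; ring⟩

-- values of the singleton runs of a list, in order; flag = "the current head's run has length 1 so far"
def sing : List Int → Bool → List Int
  | [], _ => []
  | [x], flag => if flag then [x] else []
  | x :: y :: t, flag =>
      if y = x then sing (y :: t) false
      else (if flag then [x] else []) ++ sing (y :: t) true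

-- B's zip-fold plus its final s[-1] step is the mstep-fold over the singleton-run values.
theorem foldl_bstep_eq_sing (t : List Int) : ∀ (x : Int) (b : Option Int) (r : Int), 1 ≤ r →
    (if (((x :: t).zip t).foldl bstep (b, r)).2 == 1
       then mstep (((x :: t).zip t).foldl bstep (b, r)).1 ((x :: t).getLastD 0)
       else (((x :: t).zip t).foldl bstep (b, r)).1)
    = (sing (x :: t) (decide (r = 1))).foldl mstep b := by
  induction t with
  | nil =>
    intro x b r _
    by_cases hr : r = 1 <;> simp [sing, hr]
  | cons y t' ih =>
    intro x b r hr
    have hzip : (x :: y :: t').zip (y :: t') = (x, y) :: (y :: t').zip t' := rfl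
    rw [hzip]
    simp only [List.foldl_cons]
    by_cases hxy : y = x
    · have hb : bstep (b, r) (x, y) = (b, r + 1) := by simp [bstep, hxy]
      rw [hb]
      have := ih y b (r + 1) (by omega)
      rw [show (x :: y :: t').getLastD 0 = (y :: t').getLastD 0 from rfl]
      rw [this]
      have h1 : decide (r + 1 = 1) = false := by simp; omega
      rw [h1]
      simp [sing, hxy]
    · have hb : bstep (b, r) (x, y) = (if r == 1 then mstep b x else b, 1) := by
        simp [bstep, hxy]
      rw [hb]
      have := ih y (if r == 1 then mstep b x else b) 1 le_rfl
      rw [show (x :: y :: t').getLastD 0 = (y :: t').getLastD 0 from rfl]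
      rw [this]
      rw [show sing (x :: y :: t') (decide (r = 1))
          = (if decide (r = 1) then [x] else []) ++ sing (y :: t') true from by
        simp [sing, hxy]]
      rw [List.foldl_append]
      by_cases hr1 : r = 1 <;> simp [hr1]

-- membership in sing: exactly the elements occurring once (needs sortedness: equal elements adjacent)
theorem mem_sing (t : List Int) : ∀ (x : Int) (flag : Bool) (z : Int),
    (x :: t).Pairwise (· ≤ ·) →
    (z ∈ sing (x :: t) flag ↔ (flag = true ∧ z = x ∧ x ∉ t) ∨ (z ∈ t ∧ z ≠ x ∧ t.count z = 1)) := by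
  induction t with
  | nil =>
    intro x flag z _
    cases flag <;> simp [sing]
  | cons y t' ih =>
    intro x flag z hp
    rcases List.pairwise_cons.mp hp with ⟨hx, hp'⟩
    rcases List.pairwise_cons.mp hp' with ⟨hy, _⟩
    have hcnt : (y :: t').count z = t'.count z + (if y = z then 1 else 0) := by
      simp [List.count_cons]
    by_cases hxy : y = x
    · have hs : sing (x :: y :: t') flag = sing (y :: t') false := by simp [sing, hxy]
      rw [hs, ih y false z hp']
      subst hxy
      constructor
      · rintro (⟨h, _⟩ | ⟨hz, hzy, hc⟩)
        · exact absurd h (by simp)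
        · refine Or.inr ⟨List.mem_cons_of_mem _ hz, hzy, ?_⟩
          rw [hcnt, if_neg (fun h => hzy h.symm)]
          omega
      · rintro (⟨_, _, hnx⟩ | ⟨hz, hzy, hc⟩)
        · exact absurd List.mem_cons_self hnx
        · have hz' : z ∈ t' := by
            rcases List.mem_cons.mp hz with h | h
            · exact absurd h hzy
            · exact h
          refine Or.inr ⟨hz', hzy, ?_⟩
          rw [hcnt, if_neg (fun h => hzy h.symm)] at hc
          omega
    · have hlt : x < y := lt_of_le_of_ne (hx y List.mem_cons_self) (fun h => hxy h.symm)
      have hlt' : ∀ w ∈ y :: t', x < w := by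
        intro w hw
        rcases List.mem_cons.mp hw with h | h
        · rw [h]; exact hlt
        · exact lt_of_lt_of_le hlt (hy w h)
      have hxnot : x ∉ y :: t' := fun h => lt_irrefl x (hlt' x h)
      have hs : sing (x :: y :: t') flag
          = (if flag then [x] else []) ++ sing (y :: t') true := by simp [sing, hxy]
      rw [hs]
      rw [List.mem_append, ih y true z hp']
      constructor
      · rintro (hz | (⟨_, hzy, hnt⟩ | ⟨hz, hzy, hc⟩))
        · have hzx : z = x ∧ flag = true := by
            cases flag <;> simp_all
          exact Or.inl ⟨hzx.2, hzx.1, hxnot⟩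
        · subst hzy
          refine Or.inr ⟨List.mem_cons_self, fun h => hxy h.symm.symm, ?_⟩
          rw [hcnt, if_pos rfl, List.count_eq_zero.mpr hnt]
        · have hzx : z ≠ x := fun h => lt_irrefl x (h ▸ hlt' z (List.mem_cons_of_mem _ hz))
          refine Or.inr ⟨List.mem_cons_of_mem _ hz, hzx, ?_⟩
          rw [hcnt, if_neg (fun h => hzy h.symm)]
          omega
      · rintro (⟨hf, hzx, _⟩ | ⟨hz, hzx, hc⟩)
        · subst hzx; subst hf; exact Or.inl (by simp)
        · rw [hcnt] at hc
          rcases List.mem_cons.mp hz with h | h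
          · rw [if_pos h.symm] at hc
            have hnt : z ∉ t' := List.count_eq_zero.mp (by omega)
            exact Or.inr (Or.inl ⟨rfl, h, h ▸ hnt⟩)
          · have hzy : z ≠ y := by
              intro he
              have h1 : 0 < t'.count z := List.count_pos_iff.mpr h
              rw [if_pos he.symm] at hc
              omega
            refine Or.inr (Or.inr ⟨h, hzy, ?_⟩)
            rw [if_neg (fun hh => hzy hh.symm)] at hc
            omega

theorem mem_sing_true (x : Int) (t : List Int) (hp : (x :: t).Pairwise (· ≤ ·)) (z : Int) :
    z ∈ sing (x :: t) true ↔ z ∈ (x :: t) ∧ (x :: t).count z = 1 := by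
  rw [mem_sing t x true z hp]
  have hcnt : (x :: t).count z = t.count z + (if x = z then 1 else 0) := by
    simp [List.count_cons]
  constructor
  · rintro (⟨_, hzx, hnt⟩ | ⟨hz, hzx, hc⟩)
    · subst hzx
      refine ⟨List.mem_cons_self, ?_⟩
      rw [hcnt, if_pos rfl, List.count_eq_zero.mpr hnt]
    · refine ⟨List.mem_cons_of_mem _ hz, ?_⟩
      rw [hcnt, if_neg (fun h => hzx h.symm)]
      omega
  · rintro ⟨hz, hc⟩
    rw [hcnt] at hc
    by_cases hzx : z = x
    · rw [if_pos hzx.symm] at hc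
      exact Or.inl ⟨rfl, hzx, hzx ▸ List.count_eq_zero.mp (by omega)⟩
    · have hz' : z ∈ t := by
        rcases List.mem_cons.mp hz with h | h
        · exact absurd h hzx
        · exact h
      refine Or.inr ⟨hz', hzx, ?_⟩
      rw [if_neg (fun h => hzx h.symm)] at hc
      omega

theorem encontra_spec_aux (arr : List Int) :
    encontra_maior_hash_count arr = encontra_maior_hash_count_alt arr := by
  by_cases hnil : arr = []
  · subst hnil; rfl
  · have hne : arr.isEmpty = false := by simp [hnil]
    have hlen : ¬ arr.length < 1 := by simp [hnil]
    unfold encontra_maior_hash_count encontra_maior_hash_count_alt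
    rw [hne]
    simp only [Bool.false_or, decide_eq_true_eq, if_neg hlen, if_neg (by simp : ¬ (false = true))]
    rw [seen_eq_counter]
    simp only [PySem.Dict.getD_counter]
    rw [pair_fold_split (fun i => (arr.count i : Int)) arr none 0]
    -- B side: name the sorted list and peel its head
    have hperm : (PySem.List.sorted arr (fun x => x) false).Perm arr := PySem.List.sorted_perm arr _ _
    have hpw : (PySem.List.sorted arr (fun x => x) false).Pairwise (· ≤ ·) := by
      simpa using PySem.List.sorted_pairwise arr (fun x => x)
    have hlen2 : (PySem.List.sorted arr (fun x => x) false).length = arr.length :=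
      PySem.List.length_sorted arr _ _
    cases hs : PySem.List.sorted arr (fun x => x) false with
    | nil =>
      exact absurd ((PySem.List.sorted_eq_nil_iff arr (fun x => x) false).mp hs) hnil
    | cons x t =>
      rw [hs] at hperm hpw hlen2
      rw [PySem.List.slice_from_one, PySem.List.pyGet?_neg_one]
      have hlast : (x :: t).getLast? = some ((x :: t).getLastD 0) := by
        cases hl : (x :: t).getLast? with
        | none => simp at hl
        | some l => simp [List.getLastD_eq_getLast?, hl]
      rw [hlast]
      rw [show (x :: t).tail = t from rfl]
      rw [Prod.mk.injEq]
      constructor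
      · -- max components agree
        rw [foldl_bstep_eq_sing t x none 1 le_rfl]
        have hmemA : ∀ z, z ∈ arr.filter (fun i => decide (¬ (1:Int) < (arr.count i : Int)))
            ↔ z ∈ sing (x :: t) (decide ((1:Int) = 1)) := by
          intro z
          rw [show decide ((1:Int) = 1) = true from rfl, mem_sing_true x t hpw z,
            List.mem_filter, hperm.mem_iff, hperm.count_eq z]
          simp only [decide_eq_true_eq, not_lt]
          constructor
          · rintro ⟨hz, hc⟩
            have h1 : 0 < arr.count z := List.count_pos_iff.mpr hz
            exact ⟨hz, by omega⟩
          · rintro ⟨hz, hc⟩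
            exact ⟨hz, by omega⟩
        have hA : arr.foldl (fun acc i => if 1 < (arr.count i : Int) then acc else mstep acc i) none
            = (arr.filter (fun i => decide (¬ (1:Int) < (arr.count i : Int)))).foldl mstep none := by
          have hfun : (fun (acc : Option Int) (i : Int) =>
              if 1 < (arr.count i : Int) then acc else mstep acc i)
              = fun acc i => if ¬ 1 < (arr.count i : Int) then mstep acc i else acc := by
            funext acc i; rw [ite_not]
          rw [hfun, PySem.List.foldl_ite_eq_foldl_filter]
        rw [hA]
        exact foldl_mstep_eq_of_same_mem _ _ hmemA
      · -- lengths agree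
        rw [hlen2]
        simp
-- ===== VERDICT (by name: the statement is the Claim_ definition above) =====
theorem encontra_maior_hash_count_spec : Claim_equal_encontra_maior_hash_count := by
  intro arr _
  show _ = _
  exact encontra_spec_aux arr
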